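-- pv_equiv track=rewrite | github.com/WebApp-UoM/class-backend | model.py | subjects_to_dict
-- ===== SOURCE A (Python) =====
-- def subjects_to_dict(data):
--     format = {}
--     if len(data) > 0:
--         for row in data:
--             if row[0] not in format:
--                 format[row[0]] = []
--             format[row[0]].append(row[1])
--     return format
-- ===== SOURCE B (Python) =====
-- def subjects_to_dict(data):
--     # two-pass: collect distinct keys in first-occurrence order, then gather each group
--     keys = dict.fromkeys(k for k, _ in data)
--     return {k: [v for kk, v in data if kk == k] for k in keys}
-- ===== Notes on version B (the rewrite author's own statement) =====
-- stated objective: alternative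
-- what changed: A builds the grouping in one pass by mutating a dict entry per row; B first dedups the keys in first-occurrence order and then builds each group by an independent filtering pass over the rows.
import Mathlib
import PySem

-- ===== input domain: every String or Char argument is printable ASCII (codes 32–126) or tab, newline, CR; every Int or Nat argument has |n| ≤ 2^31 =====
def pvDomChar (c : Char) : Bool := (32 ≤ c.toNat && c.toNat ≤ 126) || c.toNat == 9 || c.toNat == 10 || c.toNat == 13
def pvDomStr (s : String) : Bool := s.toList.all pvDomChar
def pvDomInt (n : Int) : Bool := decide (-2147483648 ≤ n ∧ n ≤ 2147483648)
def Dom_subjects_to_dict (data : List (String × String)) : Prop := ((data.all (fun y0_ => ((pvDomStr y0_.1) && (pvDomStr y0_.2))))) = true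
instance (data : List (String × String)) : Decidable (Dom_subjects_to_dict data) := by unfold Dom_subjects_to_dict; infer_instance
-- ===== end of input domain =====

-- B replaces A's single mutating-dict pass by a dedup of the keys followed by one filtering pass per key (alternative decomposition, same results).


-- ===== PORT A =====
-- A: format = {}; for row in data: if row[0] not in format: format[row[0]] = []; format[row[0]].append(row[1])
-- (the 'if len(data) > 0' guard is redundant over an empty loop and folds away identically)
def subjects_to_dict (data : List (String × String)) : List (String × List String) :=
  (data.foldl
    (fun fmt row =>
      let fmt := if fmt.contains row.1 then fmt else fmt.insert row.1 []
      fmt.modify row.1 [] (fun l => l ++ [row.2]))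
    PySem.Dict.empty).items

-- ===== PORT B =====
-- B: keys = dict.fromkeys(k for k,_ in data); {k: [v for kk,v in data if kk == k] for k in keys}
def subjects_to_dict_alt (data : List (String × String)) : List (String × List String) :=
  (PySem.List.dedup (data.map Prod.fst)).map
    (fun k => (k, (data.filter (fun r => r.1 == k)).map Prod.snd))

-- ===== PRECONDITION & SPEC =====
def Spec_subjects_to_dict (data : List (String × String)) (out : List (String × List String)) : Prop := out = subjects_to_dict_alt data
instance (data : List (String × String)) (out : List (String × List String)) : Decidable (Spec_subjects_to_dict data out) := by unfold Spec_subjects_to_dict; infer_instance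

-- ===== CLAIM (what is proved, stated in full; the proofs are below) =====
def Claim_equal_subjects_to_dict : Prop := ∀ (data : List (String × String)), Dom_subjects_to_dict data → Spec_subjects_to_dict data (subjects_to_dict data)

-- ===== LEMMAS AND PROOFS =====

-- A's loop body ('insert [] if absent, then append') is exactly Dict.modify with default [].
theorem step_eq_modify (fmt : PySem.Dict String (List String)) (row : String × String) :
    (if fmt.contains row.1 then fmt else fmt.insert row.1 []).modify row.1 [] (fun l => l ++ [row.2])
      = fmt.modify row.1 [] (fun l => l ++ [row.2]) := by
  by_cases hc : fmt.contains row.1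
  · simp [hc]
  · simp only [Bool.not_eq_true] at hc
    simp [hc, PySem.Dict.modify, PySem.Dict.insert_insert_self,
      PySem.Dict.getD_insert_self, PySem.Dict.getD_of_not_contains fmt [] hc]

theorem subjects_to_dict_spec : Claim_equal_subjects_to_dict := by
  intro data _
  unfold Spec_subjects_to_dict subjects_to_dict subjects_to_dict_alt
  have hfold : data.foldl
      (fun fmt row =>
        let fmt := if fmt.contains row.1 then fmt else fmt.insert row.1 []
        fmt.modify row.1 [] (fun l => l ++ [row.2]))
      PySem.Dict.empty
      = data.foldl (fun fmt row => fmt.modify row.1 [] (fun l => l ++ [row.2])) PySem.Dict.empty := by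
    congr 1
    funext fmt row
    exact step_eq_modify fmt row
  rw [hfold]
  set D := data.foldl (fun fmt row => fmt.modify row.1 [] (fun l => l ++ [row.2])) PySem.Dict.empty with hD
  have hnd : D.keys.Nodup := by
    rw [hD]
    exact PySem.Dict.nodup_keys_foldl_modify_key data Prod.fst [] (fun d r l => l ++ [r.2])
      PySem.Dict.empty PySem.Dict.nodup_keys_empty
  have hkeys : D.keys = PySem.List.dedup (data.map Prod.fst) := by
    rw [hD]
    rw [PySem.Dict.keys_foldl_modify_key]
    simp [PySem.Dict.keys_empty, PySem.Set.update_nil_left, PySem.List.dedup_eq_ofList]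
  have hget : ∀ k, D.getD k [] = (data.filter (fun r => r.1 == k)).map Prod.snd := by
    intro k
    rw [hD, PySem.Dict.getD_foldl_modify_append]
    simp [PySem.Dict.getD_empty]
  rw [PySem.Dict.items_eq_map_keys D hnd [], hkeys]
  exact List.map_congr_left (fun k _ => by rw [hget k])
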